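-- pv_equiv track=rewrite | github.com/TU-Wien-dataLAB/aqueduct | aqueduct/mock_api/endpoints.py | _path_matches_template
-- ===== SOURCE A (Python) =====
-- def _path_matches_template(path: str, template: str) -> bool:
--     """
--     Check if a path matches a template where the string "id" is a wildcard.
--
--     Examples:
--         "batches/batch-abc123/cancel" matches "batches/id/cancel"
--         "vector_stores/vs-mock-123/files" matches "vector_stores/id/files"
--     """
--     path_segments = path.split("/")
--     template_segments = template.split("/")
--
--     if len(path_segments) != len(template_segments):
--         return False
--
--     for path_seg, template_seg in zip(path_segments, template_segments, strict=True):
--         if template_seg == "id":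
--             continue  # 'id' matches anything
--         if path_seg != template_seg:
--             return False
--
--     return True
-- ===== SOURCE B (Python) =====
-- def _path_matches_template(path: str, template: str) -> bool:
--     """Stream both raw strings segment-by-segment with find/slice, no split lists, no zip."""
--     def first_seg(s):
--         k = s.find("/")
--         if k < 0:
--             return s, None
--         return s[:k], s[k + 1:]
--
--     p, t = path, template
--     while True:
--         pseg, prest = first_seg(p)
--         tseg, trest = first_seg(t)
--         if tseg != "id" and pseg != tseg:
--             return False
--         if prest is None and trest is None:
--             return True
--         if prest is None or trest is None:
--             return False
--         p, t = prest, trest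
-- ===== Notes on version B (the rewrite author's own statement) =====
-- stated objective: alternative
-- what changed: Instead of splitting both strings into segment lists and comparing them with a zipped loop after a length check, B streams over the two raw strings with a find/slice two-pointer scan, cutting one segment at a time and discovering a length mismatch lazily as it goes.
import Mathlib
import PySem

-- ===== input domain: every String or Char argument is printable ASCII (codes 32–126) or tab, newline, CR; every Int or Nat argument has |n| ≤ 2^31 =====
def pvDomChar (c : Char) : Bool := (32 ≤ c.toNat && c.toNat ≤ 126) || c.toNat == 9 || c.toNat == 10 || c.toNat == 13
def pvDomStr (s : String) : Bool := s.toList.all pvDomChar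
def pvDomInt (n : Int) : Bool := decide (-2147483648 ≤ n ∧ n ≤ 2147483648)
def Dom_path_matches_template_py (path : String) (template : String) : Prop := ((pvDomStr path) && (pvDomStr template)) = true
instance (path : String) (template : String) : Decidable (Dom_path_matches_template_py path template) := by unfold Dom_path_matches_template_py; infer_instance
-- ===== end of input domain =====

-- B replaces A's split-into-lists + length-check + zipped comparison loop by a streaming
-- two-pointer scan that cuts one segment at a time off both raw strings with find/slice
-- (alternative decomposition, same cost).


-- ===== PORT A =====
-- literal port of A: split both strings on "/", reject on length mismatch, then loop
-- over the zipped segment pairs with an early-exit accumulator ('id' matches anything)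
def path_matches_template_py (path : String) (template : String) : Bool :=
  let path_segments := PySem.Chars.splitOn path.toList "/".toList
  let template_segments := PySem.Chars.splitOn template.toList "/".toList
  if path_segments.length ≠ template_segments.length then false
  else (path_segments.zip template_segments).foldl
    (fun ok pt => ok && (pt.2 == "id".toList || pt.1 == pt.2)) true

-- ===== PORT B =====
-- Source B's first_seg: s.find("/") (findIdx?); s[:k] = take k, s[k+1:] = drop (k+1)
def pvFirstSeg (s : List Char) : List Char × Option (List Char) :=
  match s.findIdx? (· == '/') with
  | none => (s, none)
  | some k => (s.take k, some (s.drop (k + 1)))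

-- termination lemma for the scan loop: the remainder after the first '/' is shorter
theorem pvFirstSeg_lt (s r : List Char) (h : (pvFirstSeg s).2 = some r) :
    r.length < s.length := by
  unfold pvFirstSeg at h
  cases hf : s.findIdx? (· == '/') with
  | none => simp [hf] at h
  | some k =>
    simp [hf] at h
    have hk : k < s.length := List.findIdx?_eq_some_iff_findIdx_eq.mp hf |>.1
    subst h
    simp [List.length_drop]
    omega

-- port of Source B's while loop: cut one segment off each string, compare, recurse on the rests
def pvScan (p t : List Char) : Bool :=
  let fp := pvFirstSeg p
  let ft := pvFirstSeg t
  if ft.1 ≠ "id".toList ∧ fp.1 ≠ ft.1 then false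
  else
    match hp : fp.2, ft.2 with
    | none, none => true
    | some p', some t' => pvScan p' t'
    | _, _ => false
termination_by p.length
decreasing_by exact pvFirstSeg_lt p p' hp

def path_matches_template_py_alt (path : String) (template : String) : Bool :=
  pvScan path.toList template.toList

-- ===== PRECONDITION & SPEC =====
def Spec_path_matches_template_py (path : String) (template : String) (out : Bool) : Prop := out = path_matches_template_py_alt path template
instance (path : String) (template : String) (out : Bool) : Decidable (Spec_path_matches_template_py path template out) := by unfold Spec_path_matches_template_py; infer_instance

-- ===== CLAIM (what is proved, stated in full; the proofs are below) =====
def Claim_equal_path_matches_template_py : Prop := ∀ (path : String) (template : String), Dom_path_matches_template_py path template → Spec_path_matches_template_py path template (path_matches_template_py path template)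

-- ===== LEMMAS AND PROOFS =====

-- recursive characterisation of A's "length check + zipped all" on segment lists
def pvARec : List (List Char) → List (List Char) → Bool
  | [], [] => true
  | p :: ps, t :: ts => (t == "id".toList || p == t) && pvARec ps ts
  | _, _ => false

theorem pv_foldl_and (l : List (List Char × List Char)) (f : List Char × List Char → Bool) (b : Bool) :
    l.foldl (fun ok pt => ok && f pt) b = (b && l.all f) := by
  induction l generalizing b with
  | nil => simp
  | cons x xs ih => simp [List.foldl, ih, Bool.and_assoc]

theorem pvARec_eq (ps ts : List (List Char)) :
    (if ps.length ≠ ts.length then false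
     else (ps.zip ts).foldl (fun ok pt => ok && (pt.2 == "id".toList || pt.1 == pt.2)) true)
      = pvARec ps ts := by
  induction ps generalizing ts with
  | nil => cases ts <;> simp [pvARec]
  | cons p ps' ih =>
    cases ts with
    | nil => simp [pvARec]
    | cons t ts' =>
      by_cases h : ps'.length = ts'.length
      · rw [if_neg (by simp [h])]
        rw [pv_foldl_and]
        simp only [pvARec]
        rw [← ih ts', if_neg (by simp [h]), pv_foldl_and]
        simp [Bool.and_assoc]
      · rw [if_pos (by simp [h])]
        simp only [pvARec]
        rw [← ih ts', if_pos (by simp [h])]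
        simp

-- pvFirstSeg in takeWhile/dropWhile form
theorem pvFirstSeg_eq (s : List Char) :
    pvFirstSeg s = (s.takeWhile (· != '/'),
      match s.dropWhile (· != '/') with | [] => none | _ :: r => some r) := by
  induction s with
  | nil => rfl
  | cons c cs ih =>
    by_cases hc : c = '/'
    · subst hc
      unfold pvFirstSeg
      rw [List.findIdx?_cons]
      simp [List.takeWhile, List.dropWhile]
    · have hb : (c == '/') = false := beq_eq_false_iff_ne.mpr hc
      have hb' : (c != '/') = true := by simp [bne, hb]
      have hmain : (c :: cs).findIdx? (· == '/') = (cs.findIdx? (· == '/')).map (· + 1) := by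
        rw [List.findIdx?_cons]; simp [hb]
      unfold pvFirstSeg at ih ⊢
      rw [hmain, List.takeWhile_cons_of_pos (p := fun x => x != '/') hb',
        List.dropWhile_cons_of_pos (p := fun x => x != '/') hb']
      cases hf : cs.findIdx? (· == '/') with
      | none =>
        rw [hf] at ih
        simp only [Option.map_none]
        have h1 := congrArg Prod.fst ih
        have h2 := congrArg Prod.snd ih
        simp only at h1 h2
        rw [← h1, ← h2]
      | some k =>
        rw [hf] at ih
        simp only [Option.map_some]
        have h1 := congrArg Prod.fst ih
        have h2 := congrArg Prod.snd ih
        simp only at h1 h2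
        rw [List.take_succ_cons, List.drop_succ_cons, h1, h2]

-- unfolding of PySem's splitOn with separator "/": fuel-generic invariant for its go loop
theorem pvSplitOn_go (l : List Char) : ∀ (fuel : ℕ) (cur : List Char) (acc : List (List Char)),
    l.length < fuel →
    PySem.Chars.splitOn.go "/".toList fuel l cur acc
      = acc.reverse ++ (cur.reverse ++ l.takeWhile (· != '/')) ::
          (match l.dropWhile (· != '/') with
           | [] => []
           | _ :: rest => PySem.Chars.splitOn rest "/".toList) := by
  induction hn : l.length using Nat.strong_induction_on generalizing l with
  | _ n ih =>
  subst hn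
  intro fuel cur acc h
  cases fuel with
  | zero => omega
  | succ fuel =>
    cases l with
    | nil => simp [PySem.Chars.splitOn.go, List.takeWhile, List.dropWhile]
    | cons c rest =>
      have hlt : rest.length < ('/' :: rest).length := by simp
      by_cases hc : c = '/'
      · subst hc
        have hpre : ("/".toList.isPrefixOf ('/' :: rest)) = true := by
          simp [List.isPrefixOf]
        rw [PySem.Chars.splitOn.go]
        simp only [hpre, if_true]
        have hdrop : List.drop "/".toList.length ('/' :: rest) = rest := rfl
        rw [hdrop]
        have hlen : rest.length < fuel := by simp at h; omega
        rw [ih rest.length hlt rest rfl fuel [] (cur.reverse :: acc) hlen]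
        have hrec : PySem.Chars.splitOn rest "/".toList
            = rest.takeWhile (· != '/') ::
              (match rest.dropWhile (· != '/') with
               | [] => []
               | _ :: r => PySem.Chars.splitOn r "/".toList) := by
          rw [PySem.Chars.splitOn,
            ih rest.length hlt rest rfl (rest.length + 1) [] [] (by omega)]
          simp
        have htw : List.takeWhile (· != '/') ('/' :: rest) = [] := by simp
        have hdw : List.dropWhile (· != '/') ('/' :: rest) = '/' :: rest := by simp
        rw [htw, hdw]
        rw [show (match ('/' :: rest : List Char) with
              | [] => ([] : List (List Char))
              | _ :: r => PySem.Chars.splitOn r "/".toList)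
            = PySem.Chars.splitOn rest "/".toList from rfl]
        rw [hrec]
        simp
      · have hb : (c == '/') = false := beq_eq_false_iff_ne.mpr hc
        have hb' : (c != '/') = true := by simp [bne, hb]
        have hpre : ("/".toList.isPrefixOf (c :: rest)) = false := by
          simp [List.isPrefixOf]
          exact fun hcc => absurd hcc.symm hc
        rw [PySem.Chars.splitOn.go]
        simp only [hpre, Bool.false_eq_true, if_false]
        have hlen : rest.length < fuel := by simp at h; omega
        rw [ih rest.length (by simp) rest rfl fuel (c :: cur) acc hlen]
        rw [List.takeWhile_cons_of_pos (p := fun x => x != '/') hb',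
          List.dropWhile_cons_of_pos (p := fun x => x != '/') hb']
        simp

theorem pvSplitOn_slash (l : List Char) :
    PySem.Chars.splitOn l "/".toList
      = (l.takeWhile (· != '/')) ::
          (match l.dropWhile (· != '/') with
           | [] => []
           | _ :: rest => PySem.Chars.splitOn rest "/".toList) := by
  rw [PySem.Chars.splitOn, pvSplitOn_go l (l.length + 1) [] [] (by omega)]
  simp

theorem pvARec_nil_splitOn (r : List Char) :
    pvARec [] (PySem.Chars.splitOn r ['/']) = false := by
  rw [show (['/'] : List Char) = "/".toList from rfl, pvSplitOn_slash]; rfl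

theorem pvARec_splitOn_nil (r : List Char) :
    pvARec (PySem.Chars.splitOn r ['/']) [] = false := by
  rw [show (['/'] : List Char) = "/".toList from rfl, pvSplitOn_slash]; rfl

-- main bridge: B's streaming scan computes A's recursion over the split segment lists
theorem pvScan_eq (p t : List Char) :
    pvScan p t = pvARec (PySem.Chars.splitOn p "/".toList) (PySem.Chars.splitOn t "/".toList) := by
  induction hn : p.length using Nat.strong_induction_on generalizing p t with
  | _ n ih =>
  subst hn
  rw [pvScan, pvSplitOn_slash p, pvSplitOn_slash t]
  rw [pvFirstSeg_eq p, pvFirstSeg_eq t]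
  simp only []
  by_cases hfail : (t.takeWhile (· != '/')) ≠ "id".toList ∧ (p.takeWhile (· != '/')) ≠ (t.takeWhile (· != '/'))
  · rw [if_pos hfail]
    have hh : ((t.takeWhile (· != '/')) == "id".toList || (p.takeWhile (· != '/')) == (t.takeWhile (· != '/'))) = false := by
      rw [Bool.or_eq_false_iff]
      exact ⟨beq_eq_false_iff_ne.mpr hfail.1, beq_eq_false_iff_ne.mpr hfail.2⟩
    simp only [pvARec, hh, Bool.false_and]
  · rw [if_neg hfail]
    have hhead : ((t.takeWhile (· != '/')) == "id".toList || (p.takeWhile (· != '/')) == (t.takeWhile (· != '/'))) = true := by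
      rcases not_and_or.mp hfail with h | h
      · rw [Bool.or_eq_true_iff]; exact Or.inl (beq_iff_eq.mpr (not_not.mp h))
      · rw [Bool.or_eq_true_iff]; exact Or.inr (beq_iff_eq.mpr (not_not.mp h))
    cases hp : p.dropWhile (· != '/') with
    | nil =>
      cases ht : t.dropWhile (· != '/') with
      | nil => simp only [pvARec, hhead, Bool.and_true]
      | cons _ trest => simp [pvARec, pvARec_nil_splitOn]
    | cons _ prest =>
      cases ht : t.dropWhile (· != '/') with
      | nil => simp [pvARec, pvARec_splitOn_nil]
      | cons _ trest =>
        have hlt : prest.length < p.length := by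
          have hle := List.length_dropWhile_le (p := (· != '/')) (l := p)
          rw [hp] at hle
          simp at hle
          omega
        simp only [pvARec, hhead, Bool.true_and]
        exact ih prest.length hlt prest trest rfl

-- ===== VERDICT (by name: the statement is the Claim_ definition above) =====
theorem path_matches_template_py_spec : Claim_equal_path_matches_template_py := by
  intro path template _
  unfold Spec_path_matches_template_py path_matches_template_py path_matches_template_py_alt
  rw [pvScan_eq, ← pvARec_eq]
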